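-- pv_equiv track=rewrite | github.com/jsjong98/Catalyst-AI | New Code/Data_ML_revision.py | find_continuous_high_freq_sections
-- ===== SOURCE A (Python) =====
-- def find_continuous_high_freq_sections(section_counts, min_count_threshold):
--     continuous_sections = []
--     temp_section = []
--     sorted_sections = sorted(section_counts.items(), key=lambda x: x[0])
--
--     for section, count in sorted_sections:
--         if count >= min_count_threshold:
--             if not temp_section or section == temp_section[-1] + 1:
--                 temp_section.append(section)
--             else:
--                 continuous_sections.append(temp_section)
--                 temp_section = [section]
--         else:
--             if temp_section:
--                 continuous_sections.append(temp_section)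
--                 temp_section = []
--
--     if temp_section:
--         continuous_sections.append(temp_section)
--
--     return max(continuous_sections, key=len) if continuous_sections else []
-- ===== SOURCE B (Python) =====
-- def find_continuous_high_freq_sections(section_counts, min_count_threshold):
--     high = {s for s, c in section_counts.items() if c >= min_count_threshold}
--     best = []
--     for s in high:
--         if s - 1 in high:
--             continue  # not the start of a run
--         run = []
--         x = s
--         while x in high:
--             run.append(x)
--             x += 1
--         if len(run) > len(best) or (len(run) == len(best) and run[0] < best[0]):
--             best = run
--     return best
-- ===== Notes on version B (the rewrite author's own statement) =====
-- stated objective: faster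
-- what changed: Replaces A's sort-items + sequential run-grouping + max(key=len) pass by a hash set of high-count sections scanned only at run starts (s-1 not in the set), extending each run by set membership and keeping the best run (longer, or equal length with smaller start) in a single unordered pass without sorting.
import Mathlib
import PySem

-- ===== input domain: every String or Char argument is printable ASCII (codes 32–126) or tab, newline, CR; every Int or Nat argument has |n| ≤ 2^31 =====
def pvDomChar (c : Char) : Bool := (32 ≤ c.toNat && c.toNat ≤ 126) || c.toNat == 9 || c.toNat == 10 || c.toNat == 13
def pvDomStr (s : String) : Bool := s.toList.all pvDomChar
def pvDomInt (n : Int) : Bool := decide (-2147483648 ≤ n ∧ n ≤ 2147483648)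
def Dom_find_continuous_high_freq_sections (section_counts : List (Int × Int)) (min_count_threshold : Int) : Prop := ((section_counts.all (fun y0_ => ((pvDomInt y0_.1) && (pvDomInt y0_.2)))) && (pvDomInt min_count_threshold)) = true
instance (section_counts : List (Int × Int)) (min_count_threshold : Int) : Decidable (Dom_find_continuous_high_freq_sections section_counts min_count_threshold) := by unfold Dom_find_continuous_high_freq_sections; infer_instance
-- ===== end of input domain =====

-- B replaces A's sort + run-grouping + max pass by a set of high-count keys scanned from each
-- run start (s-1 not in the set), keeping the best run as it goes (alternative algorithm, no sort).

-- ===== PORT A =====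
-- Port of A: sort dict items by key, group consecutive high-count keys, return first max-by-len.
def find_continuous_high_freq_sections (section_counts : List (Int × Int)) (min_count_threshold : Int) : List Int :=
  let sorted_sections := PySem.List.sorted (PySem.Dict.ofList section_counts).items (fun x => x.1) false
  let st := sorted_sections.foldl (fun (st : List (List Int) × List Int) p =>
      if min_count_threshold ≤ p.2 then
        if st.2 = [] ∨ p.1 = PySem.List.pyGetD st.2 (-1) 0 + 1 then (st.1, st.2 ++ [p.1])
        else (st.1 ++ [st.2], [p.1])
      else
        if st.2 ≠ [] then (st.1 ++ [st.2], []) else st) ([], [])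
  let continuous_sections := if st.2 ≠ [] then st.1 ++ [st.2] else st.1
  if continuous_sections ≠ [] then
    (PySem.List.max? continuous_sections (fun r => r.length)).getD []
  else []

-- ===== PORT B =====
-- while x in high: run.append(x); x += 1   — fuel = |high| bounds every run's length (a run's
-- elements are distinct members of high), so the fuel never runs out where the Python loop continues.
def pvExtendRun : Nat → Int → PySem.Set Int → List Int
  | 0, _, _ => []
  | f + 1, x, high => if PySem.Set.contains high x then x :: pvExtendRun f (x + 1) high else []

-- Port of B (Source B): build the set of high-count keys, walk each run from its start, keep the best.
-- run[0]/best[0] are read only when the corresponding list is nonempty, so headD 0 is exact there.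
def find_continuous_high_freq_sections_alt (section_counts : List (Int × Int)) (min_count_threshold : Int) : List Int :=
  let high : PySem.Set Int := PySem.Set.ofList
    (((PySem.Dict.ofList section_counts).items.filter (fun p => min_count_threshold ≤ p.2)).map (fun p => p.1))
  high.foldl (fun best s =>
    if PySem.Set.contains high (s - 1) then best
    else
      let run := pvExtendRun high.length s high
      if run.length > best.length ∨ (run.length = best.length ∧ run.headD 0 < best.headD 0) then run
      else best) []

-- ===== PRECONDITION & SPEC =====
def Spec_find_continuous_high_freq_sections (section_counts : List (Int × Int)) (min_count_threshold : Int) (out : List Int) : Prop := out = find_continuous_high_freq_sections_alt section_counts min_count_threshold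
instance (section_counts : List (Int × Int)) (min_count_threshold : Int) (out : List Int) : Decidable (Spec_find_continuous_high_freq_sections section_counts min_count_threshold out) := by unfold Spec_find_continuous_high_freq_sections; infer_instance

-- ===== CLAIM (what is proved, stated in full; the proofs are below) =====
def Claim_equal_find_continuous_high_freq_sections : Prop := ∀ (section_counts : List (Int × Int)) (min_count_threshold : Int), Dom_find_continuous_high_freq_sections section_counts min_count_threshold → Spec_find_continuous_high_freq_sections section_counts min_count_threshold (find_continuous_high_freq_sections section_counts min_count_threshold)

-- ===== LEMMAS AND PROOFS =====

-- A's loop step and B's loop step, named for the proofs.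
def pvAStep (thr : Int) (st : List (List Int) × List Int) (p : Int × Int) : List (List Int) × List Int :=
  if thr ≤ p.2 then
    if st.2 = [] ∨ p.1 = PySem.List.pyGetD st.2 (-1) 0 + 1 then (st.1, st.2 ++ [p.1])
    else (st.1 ++ [st.2], [p.1])
  else
    if st.2 ≠ [] then (st.1 ++ [st.2], []) else st

def pvBStep (high : PySem.Set Int) (best : List Int) (s : Int) : List Int :=
  if PySem.Set.contains high (s - 1) then best
  else
    let run := pvExtendRun high.length s high
    if run.length > best.length ∨ (run.length = best.length ∧ run.headD 0 < best.headD 0) then run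
    else best

-- binary "better run" choice (the non-skip branch of pvBStep)
def pvMax2 (best r : List Int) : List Int :=
  if r.length > best.length ∨ (r.length = best.length ∧ r.headD 0 < best.headD 0) then r else best

def pvFinalize (st : List (List Int) × List Int) : List (List Int) :=
  if st.2 ≠ [] then st.1 ++ [st.2] else st.1

-- grouping of a strictly increasing key list into maximal consecutive blocks, with the
-- currently open block b (nonempty) as accumulator
def pvGlue (b : List Int) : List Int → List (List Int)
  | [] => [b]
  | s :: t => if s = b.getLast! + 1 then pvGlue (b ++ [s]) t else b :: pvGlue [s] t

def pvBlocks : List Int → List (List Int)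
  | [] => []
  | s :: t => pvGlue [s] t

-- peel the maximal consecutive chain continuing x off the front of a list
def pvPeel : Int → List Int → List Int × List Int
  | _, [] => ([], [])
  | x, y :: t => if y = x + 1 then ((y :: (pvPeel y t).1), (pvPeel y t).2) else ([], y :: t)

def pvCands (high : PySem.Set Int) (l : List Int) : List (List Int) :=
  l.filterMap (fun s => if PySem.Set.contains high (s - 1) then none else some (pvExtendRun high.length s high))

theorem pvA_eq_fold (sc : List (Int × Int)) (thr : Int) :
    find_continuous_high_freq_sections sc thr =
      (let rs := pvFinalize ((PySem.List.sorted (PySem.Dict.ofList sc).items (fun x => x.1) false).foldl (pvAStep thr) ([], []))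
       if rs ≠ [] then (PySem.List.max? rs (fun r => r.length)).getD [] else []) := rfl

theorem pvB_eq_fold (sc : List (Int × Int)) (thr : Int) :
    find_continuous_high_freq_sections_alt sc thr =
      (let high : PySem.Set Int := PySem.Set.ofList
          (((PySem.Dict.ofList sc).items.filter (fun p => thr ≤ p.2)).map (fun p => p.1))
       high.foldl (pvBStep high) []) := rfl

theorem pvBStep_fold (high : PySem.Set Int) (l : List Int) : ∀ acc : List Int,
    l.foldl (pvBStep high) acc = (pvCands high l).foldl pvMax2 acc := by
  intro acc
  induction l generalizing acc with
  | nil => rfl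
  | cons s t ih =>
      simp only [List.foldl_cons, pvCands, List.filterMap_cons, pvBStep]
      by_cases h : (s - 1) ∈ high
      · simp [h, ih, pvCands]
      · simp [h, ih, pvCands, pvMax2]

theorem pyGetD_neg_one (temp : List Int) (h : temp ≠ []) : PySem.List.pyGetD temp (-1) 0 = temp.getLast! := by
  have hl : 0 < temp.length := List.length_pos_iff.mpr h
  simp only [PySem.List.pyGetD, PySem.List.pyGet?, PySem.List.pyIdx?]
  rw [if_neg (by omega), if_pos (by omega : -(temp.length:Int) ≤ -1)]
  have : temp.length - (-(-1:Int)).toNat = temp.length - 1 := by norm_num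
  rw [this]
  simp only [Option.bind_some, List.getElem?_eq_getElem (by omega : temp.length - 1 < temp.length), Option.getD_some]
  obtain ⟨l, a, rfl⟩ : ∃ l a, temp = l ++ [a] := by
    induction temp using List.reverseRecOn with
    | nil => exact absurd rfl h
    | append_singleton l a _ => exact ⟨l, a, rfl⟩
  simp

theorem pvAStep_fold (thr : Int) (l : List (Int × Int)) : ∀ (cont : List (List Int)) (temp : List Int),
    l.Pairwise (fun a b => a.1 < b.1) →
    (temp ≠ [] → ∀ p ∈ l, temp.getLast! + 1 ≤ p.1) →
    pvFinalize (l.foldl (pvAStep thr) (cont, temp)) =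
      (if temp = [] then cont ++ pvBlocks ((l.filter (fun p => thr ≤ p.2)).map (fun p => p.1))
       else cont ++ pvGlue temp ((l.filter (fun p => thr ≤ p.2)).map (fun p => p.1))) := by
  induction l with
  | nil =>
      intro cont temp _ _
      by_cases h : temp = [] <;> simp [h, pvFinalize, pvBlocks, pvGlue]
  | cons p l ih =>
      intro cont temp hpw hinv
      have hpw' : l.Pairwise (fun a b => a.1 < b.1) := hpw.tail
      have hkey : ∀ q ∈ l, p.1 < q.1 := by
        intro q hq; exact List.rel_of_pairwise_cons hpw hq
      by_cases hc : thr ≤ p.2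
      · -- high item
        have hfil : ((p :: l).filter (fun q => decide (thr ≤ q.2))).map (fun q => q.1)
            = p.1 :: (l.filter (fun q => decide (thr ≤ q.2))).map (fun q => q.1) := by
          simp [hc]
        by_cases ht : temp = []
        · subst ht
          have step : pvAStep thr (cont, []) p = (cont, [p.1]) := by
            simp [pvAStep, hc]
          rw [List.foldl_cons, step, ih cont [p.1] hpw' (by
            intro _ q hq
            have : ([p.1] : List Int).getLast! = p.1 := by simp
            rw [this]
            have := hkey q hq; omega)]
          simp only [hfil, if_neg (by simp : ¬([p.1] : List Int) = []), pvBlocks]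
          simp
        · have hlast := pyGetD_neg_one temp ht
          by_cases hcons : p.1 = temp.getLast! + 1
          · have step : pvAStep thr (cont, temp) p = (cont, temp ++ [p.1]) := by
              simp only [pvAStep, if_pos hc, hlast]
              rw [if_pos (Or.inr hcons)]
            rw [List.foldl_cons, step, ih cont (temp ++ [p.1]) hpw' (by
              intro _ q hq
              have : (temp ++ [p.1]).getLast! = p.1 := by simp
              rw [this]
              have := hkey q hq; omega)]
            rw [if_neg (by simp), if_neg ht, hfil, pvGlue, if_pos hcons]
          · have step : pvAStep thr (cont, temp) p = (cont ++ [temp], [p.1]) := by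
              simp only [pvAStep, if_pos hc, hlast]
              rw [if_neg (by push Not; exact ⟨ht, hcons⟩)]
            rw [List.foldl_cons, step, ih (cont ++ [temp]) [p.1] hpw' (by
              intro _ q hq
              have : ([p.1] : List Int).getLast! = p.1 := by simp
              rw [this]
              have := hkey q hq; omega)]
            rw [if_neg (by simp), if_neg ht, hfil, pvGlue, if_neg hcons]
            simp
      · -- low item
        have hfil : ((p :: l).filter (fun q => decide (thr ≤ q.2))).map (fun q => q.1)
            = (l.filter (fun q => decide (thr ≤ q.2))).map (fun q => q.1) := by
          simp [hc]
        by_cases ht : temp = []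
        · subst ht
          have step : pvAStep thr (cont, []) p = (cont, []) := by
            simp [pvAStep, hc]
          rw [List.foldl_cons, step, ih cont [] hpw' (by intro h; exact absurd rfl h), hfil]
        · have step : pvAStep thr (cont, temp) p = (cont ++ [temp], []) := by
            simp [pvAStep, hc, ht]
          rw [List.foldl_cons, step, ih (cont ++ [temp]) [] hpw' (by intro h; exact absurd rfl h)]
          rw [if_pos rfl, if_neg ht, hfil]
          have hglue : pvGlue temp ((l.filter (fun q => decide (thr ≤ q.2))).map (fun q => q.1))
              = temp :: pvBlocks ((l.filter (fun q => decide (thr ≤ q.2))).map (fun q => q.1)) := by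
            cases hhk : (l.filter (fun q => decide (thr ≤ q.2))).map (fun q => q.1) with
            | nil => simp [pvGlue, pvBlocks]
            | cons s t =>
                have hs : s ∈ (l.filter (fun q => decide (thr ≤ q.2))).map (fun q => q.1) := by
                  rw [hhk]; exact List.mem_cons_self
                obtain ⟨q, hq, rfl⟩ := List.mem_map.mp hs
                have hql : q ∈ l := (List.mem_filter.mp hq).1
                have h1 : temp.getLast! + 1 ≤ p.1 := hinv ht p List.mem_cons_self
                have h2 := hkey q hql
                rw [pvGlue, if_neg (by omega), pvBlocks]
          rw [hglue]
          simp

theorem pvGlue_peel (l : List Int) : ∀ b : List Int, b ≠ [] →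
    pvGlue b l = (b ++ (pvPeel b.getLast! l).1) :: pvBlocks (pvPeel b.getLast! l).2 := by
  induction l with
  | nil => intro b hb; simp [pvGlue, pvPeel, pvBlocks]
  | cons y t ih =>
      intro b hb
      by_cases h : y = b.getLast! + 1
      · have hlast : (b ++ [y]).getLast! = y := by simp
        rw [pvGlue, if_pos h, ih (b ++ [y]) (by simp), hlast, pvPeel, if_pos h]
        subst h; simp
      · rw [pvGlue, if_neg h, pvPeel, if_neg h]
        simp [pvBlocks]

theorem pvPeel_append (t : List Int) : ∀ x : Int, (pvPeel x t).1 ++ (pvPeel x t).2 = t := by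
  induction t with
  | nil => intro x; simp [pvPeel]
  | cons y t ih =>
      intro x
      by_cases h : y = x + 1
      · rw [pvPeel, if_pos h]; simpa using ih y
      · rw [pvPeel, if_neg h]; rfl

theorem pvPeel_chain (t : List Int) : ∀ x z : Int, z ∈ (pvPeel x t).1 → z - 1 ∈ x :: (pvPeel x t).1 := by
  induction t with
  | nil => intro x z hz; simp [pvPeel] at hz
  | cons y t ih =>
      intro x z hz
      by_cases h : y = x + 1
      · rw [pvPeel, if_pos h] at hz ⊢
        rcases List.mem_cons.mp hz with rfl | hz'
        · simp [h]
        · rcases List.mem_cons.mp (ih y z hz') with h1 | h1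
          · subst h; simp [h1]
          · simp [h1]
      · rw [pvPeel, if_neg h] at hz; simp at hz

theorem pvPeel_stop (t : List Int) : ∀ x m : Int, ∀ r' : List Int,
    (pvPeel x t).2 = m :: r' → m ≠ (x :: (pvPeel x t).1).getLast! + 1 := by
  induction t with
  | nil => intro x m r' h; simp [pvPeel] at h
  | cons y t ih =>
      intro x m r' h
      by_cases hy : y = x + 1
      · rw [pvPeel, if_pos hy] at h ⊢
        have := ih y m r' (by simpa using h)
        have hl : (x :: y :: (pvPeel y t).1).getLast! = (y :: (pvPeel y t).1).getLast! := by
          simp [List.getLast!]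
        simpa [hl] using this
      · rw [pvPeel, if_neg hy] at h ⊢
        have hym : y = m := by
          have : y :: t = m :: r' := h
          injection this
        subst hym
        simpa using hy

theorem pvExtendRun_nil (f : Nat) (x : Int) (high : PySem.Set Int) (h : x ∉ high) :
    pvExtendRun f x high = [] := by
  cases f with
  | zero => rfl
  | succ f =>
      rw [pvExtendRun, if_neg]
      simp [h]

theorem pvExtendRun_peel (high : PySem.Set Int) (t : List Int) : ∀ (x : Int) (fuel : Nat),
    (x :: t).Pairwise (· < ·) →
    (∀ y ∈ x :: t, y ∈ high) →
    (∀ y ∈ high, y ∉ x :: t → y < x) →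
    (x :: t).length ≤ fuel →
    pvExtendRun fuel x high = x :: (pvPeel x t).1 := by
  induction t with
  | nil =>
      intro x fuel _ hmem hgap hlen
      obtain ⟨f, rfl⟩ : ∃ f, fuel = f + 1 := ⟨fuel - 1, by simp at hlen; omega⟩
      rw [pvExtendRun, if_pos ((PySem.Set.contains_iff _ _).mpr (hmem x (by simp)))]
      rw [pvExtendRun_nil f (x+1) high (by
        intro hmem1
        rcases (by simpa using hgap (x+1) hmem1 : x + 1 ∈ ([x] : List Int) ∨ x + 1 < x) with h | h
        · simp at h
        · omega)]
      simp [pvPeel]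
  | cons y t ih =>
      intro x fuel hpw hmem hgap hlen
      obtain ⟨f, rfl⟩ : ∃ f, fuel = f + 1 := ⟨fuel - 1, by simp at hlen; omega⟩
      rw [pvExtendRun, if_pos ((PySem.Set.contains_iff _ _).mpr (hmem x (by simp)))]
      have hxy : x < y := List.rel_of_pairwise_cons hpw (by simp)
      by_cases h : y = x + 1
      · subst h
        rw [ih (x+1) f hpw.tail (fun z hz => hmem z (List.mem_cons_of_mem _ hz)) (by
            intro z hz hnz
            by_cases hin : z ∈ x :: (x+1) :: t
            · rcases List.mem_cons.mp hin with rfl | hin'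
              · omega
              · exact absurd hin' hnz
            · have := hgap z hz hin; omega) (by simp at hlen ⊢; omega)]
        rw [pvPeel, if_pos rfl]
      · rw [pvPeel, if_neg h]
        rw [pvExtendRun_nil f (x+1) high (by
          intro hmem1
          by_cases hin : x + 1 ∈ x :: y :: t
          · rcases List.mem_cons.mp hin with h1 | h1
            · omega
            · rcases List.mem_cons.mp h1 with h2 | h2
              · omega
              · have := List.rel_of_pairwise_cons hpw.tail h2; omega
          · have := hgap (x+1) hmem1 hin; omega)]

theorem pvGetLast_mem (l : List Int) (h : l ≠ []) : l.getLast! ∈ l := by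
  obtain ⟨l', a, rfl⟩ : ∃ l' a, l = l' ++ [a] := by
    induction l using List.reverseRecOn with
    | nil => exact absurd rfl h
    | append_singleton l' a _ => exact ⟨l', a, rfl⟩
  simp

theorem pairwise_le_getLast (l : List Int) (hpw : l.Pairwise (· < ·)) : ∀ y ∈ l, y ≤ l.getLast! := by
  induction l with
  | nil => intro y hy; simp at hy
  | cons a l ih =>
      intro y hy
      cases l with
      | nil => simp at hy; simp [hy, List.getLast!]
      | cons b l' =>
          have hl : (a :: b :: l').getLast! = (b :: l').getLast! := by simp [List.getLast!]
          rw [hl]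
          rcases List.mem_cons.mp hy with rfl | hy'
          · have hmem : (b :: l').getLast! ∈ b :: l' := pvGetLast_mem _ (by simp)
            have := List.rel_of_pairwise_cons hpw hmem
            omega
          · exact ih hpw.tail y hy'

theorem pvCands_eq_blocks (high : PySem.Set Int) : ∀ (l : List Int),
    l.Pairwise (· < ·) →
    (∀ x ∈ l, x ∈ high) →
    (∀ y ∈ high, y ∉ l → ∀ x ∈ l, y + 1 < x) →
    l.length ≤ high.length →
    pvCands high l = pvBlocks l := by
  intro l
  induction hn : l.length using Nat.strong_induction_on generalizing l with
  | _ n ihn =>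
  intro hinc hsub hgap hlen
  cases l with
  | nil => rfl
  | cons s t =>
      have hstart : PySem.Set.contains high (s - 1) = false := by
        rw [← Bool.not_eq_true]
        intro hc
        have hmem : s - 1 ∈ high := (PySem.Set.contains_iff _ _).mp hc
        have hnotin : s - 1 ∉ s :: t := by
          intro hin
          rcases List.mem_cons.mp hin with h | h
          · omega
          · have := List.rel_of_pairwise_cons hinc h; omega
        have := hgap (s - 1) hmem hnotin s (by simp)
        omega
      have hrun : pvExtendRun high.length s high = s :: (pvPeel s t).1 := by
        apply pvExtendRun_peel high t s high.length hinc hsub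
        · intro y hy hny
          have := hgap y hy hny s (by simp); omega
        · rw [hn]; exact hlen
      set c := (pvPeel s t).1 with hc
      set r := (pvPeel s t).2 with hr
      have htcr : c ++ r = t := pvPeel_append t s
      have hsc_sub : (s :: c).Sublist (s :: t) := by
        rw [← htcr]; exact (List.sublist_append_left c r).cons_cons s
      have hr_sub : r.Sublist t := by rw [← htcr]; exact List.sublist_append_right c r
      have hpw_sc : (s :: c).Pairwise (· < ·) := hinc.sublist hsc_sub
      have hpw_r : r.Pairwise (· < ·) := hinc.tail.sublist hr_sub
      have hscr : ∀ a ∈ s :: c, ∀ b ∈ r, a < b := by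
        have : (s :: (c ++ r)).Pairwise (· < ·) := by rw [htcr]; exact hinc
        intro a ha b hb
        rcases List.mem_cons.mp ha with rfl | ha'
        · exact List.rel_of_pairwise_cons hinc (by rw [← htcr]; exact List.mem_append_right c hb)
        · exact (List.pairwise_append.mp this.tail).2.2 a ha' b hb
      -- filterMap over the chain part vanishes
      have hchain : ∀ z ∈ c, (if PySem.Set.contains high (z - 1) then none
          else some (pvExtendRun high.length z high)) = (none : Option (List Int)) := by
        intro z hz
        have hz1 : z - 1 ∈ s :: c := pvPeel_chain t s z hz
        have hz1' : z - 1 ∈ s :: t := hsc_sub.mem hz1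
        rw [if_pos ((PySem.Set.contains_iff _ _).mpr (hsub _ hz1'))]
      -- the recursive call on r
      have hrec : pvCands high r = pvBlocks r := by
        rcases hr0 : r with _ | ⟨m, r'⟩
        · rfl
        · have hm_gt : ∀ a ∈ s :: c, a < m := fun a ha => hscr a ha m (by rw [hr0]; simp)
          have hstop : m ≠ (s :: c).getLast! + 1 := pvPeel_stop t s m r' (by rw [← hr]; exact hr0)
          have he_mem : (s :: c).getLast! ∈ s :: c := pvGetLast_mem _ (by simp)
          have hm2 : (s :: c).getLast! + 2 ≤ m := by
            have := hm_gt _ he_mem; omega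
          rw [← hr0]
          apply ihn r.length (by
              have : r.length ≤ t.length := hr_sub.length_le
              simp at hn; omega) r rfl hpw_r
            (fun x hx => hsub x (List.mem_cons_of_mem _ (hr_sub.mem hx)))
            (by
              intro y hy hny x hx
              by_cases hyl : y ∈ s :: t
              · have hysc : y ∈ s :: c := by
                  rcases List.mem_cons.mp hyl with rfl | hyt
                  · exact List.mem_cons_self
                  · rw [← htcr] at hyt
                    rcases List.mem_append.mp hyt with h | h
                    · exact List.mem_cons_of_mem _ h
                    · exact absurd h hny
                have hyle := pairwise_le_getLast (s :: c) hpw_sc y hysc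
                have hxm : m ≤ x := by
                  rw [hr0] at hx
                  rcases List.mem_cons.mp hx with rfl | hx'
                  · omega
                  · have := List.rel_of_pairwise_cons (hr0 ▸ hpw_r) hx'; omega
                omega
              · exact hgap y hy hyl x (List.mem_cons_of_mem _ (hr_sub.mem hx)))
            (by
              have h1 : r.length ≤ t.length := hr_sub.length_le
              simp at hn; omega)
      -- assemble
      show pvCands high (s :: t) = pvBlocks (s :: t)
      have lhs : pvCands high (s :: t) = (s :: c) :: pvCands high r := by
        rw [pvCands, ← htcr]
        rw [List.filterMap_cons, hstart]
        simp only [Bool.false_eq_true, if_false, hrun]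
        rw [List.filterMap_append, List.filterMap_eq_nil_iff.mpr hchain]
        rfl
      rw [lhs, hrec, pvBlocks, pvGlue_peel t [s] (by simp)]
      simp [← hc, ← hr]

theorem pvBStep_eq_max2 (high : PySem.Set Int) (best : List Int) (s : Int) :
    pvBStep high best s = if PySem.Set.contains high (s - 1) then best
      else pvMax2 best (pvExtendRun high.length s high) := rfl

theorem pvMax2_nil (b : List Int) : pvMax2 b [] = b := by
  rcases b with _ | ⟨x, b'⟩ <;> simp [pvMax2]

theorem pvExtendRun_headD (f : Nat) (x : Int) (high : PySem.Set Int)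
    (h : pvExtendRun f x high ≠ []) : (pvExtendRun f x high).headD 0 = x := by
  cases f with
  | zero => simp [pvExtendRun] at h
  | succ f =>
      rw [pvExtendRun] at h ⊢
      by_cases hc : PySem.Set.contains high x
      · rw [if_pos hc]; rfl
      · rw [if_neg hc] at h; exact absurd rfl h

theorem pvMax2_rcomm (b r1 r2 : List Int)
    (h : r1 = r2 ∨ r1 = [] ∨ r2 = [] ∨ r1.headD 0 ≠ r2.headD 0) :
    pvMax2 (pvMax2 b r1) r2 = pvMax2 (pvMax2 b r2) r1 := by
  rcases h with rfl | rfl | rfl | hne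
  · rfl
  · simp [pvMax2_nil]
  · simp [pvMax2_nil]
  · unfold pvMax2
    split_ifs <;> first | rfl | (exfalso; omega)

theorem pvBStep_rcomm (high : PySem.Set Int) (b : List Int) (s1 s2 : Int) :
    pvBStep high (pvBStep high b s1) s2 = pvBStep high (pvBStep high b s2) s1 := by
  rw [pvBStep_eq_max2, pvBStep_eq_max2, pvBStep_eq_max2, pvBStep_eq_max2]
  by_cases h1 : PySem.Set.contains high (s1 - 1) <;>
    by_cases h2 : PySem.Set.contains high (s2 - 1) <;>
      simp only [h1, h2, if_true, Bool.false_eq_true, if_false]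
  · apply pvMax2_rcomm
    by_cases e : s1 = s2
    · subst e; left; rfl
    · set q1 := pvExtendRun high.length s1 high
      set q2 := pvExtendRun high.length s2 high
      by_cases hq1 : q1 = []
      · right; left; exact hq1
      · by_cases hq2 : q2 = []
        · right; right; left; exact hq2
        · right; right; right
          rw [pvExtendRun_headD _ _ _ hq1, pvExtendRun_headD _ _ _ hq2]
          exact e

theorem pvGlue_ne_nil (l : List Int) : ∀ b : List Int, b ≠ [] → ∀ r ∈ pvGlue b l, r ≠ [] := by
  induction l with
  | nil => intro b hb r hr; rw [pvGlue] at hr; simp at hr; simpa [hr]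
  | cons y t ih =>
      intro b hb r hr
      rw [pvGlue] at hr
      by_cases h : y = b.getLast! + 1
      · rw [if_pos h] at hr; exact ih (b ++ [y]) (by simp) r hr
      · rw [if_neg h] at hr
        rcases List.mem_cons.mp hr with rfl | hr'
        · exact hb
        · exact ih [y] (by simp) r hr'

theorem pvGlue_heads_sublist (l : List Int) : ∀ b : List Int, b ≠ [] →
    ((pvGlue b l).map (fun r => r.headD 0)).Sublist (b.headD 0 :: l) := by
  induction l with
  | nil => intro b hb; rw [pvGlue]; simp
  | cons y t ih =>
      intro b hb
      rw [pvGlue]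
      by_cases h : y = b.getLast! + 1
      · rw [if_pos h]
        have := ih (b ++ [y]) (by simp)
        have hhd : (b ++ [y]).headD 0 = b.headD 0 := by
          rcases b with _ | ⟨a, b'⟩
          · exact absurd rfl hb
          · rfl
        rw [hhd] at this
        exact this.trans ((List.sublist_cons_self y t).cons_cons (b.headD 0))
      · rw [if_neg h]
        simp only [List.map_cons]
        exact ((ih [y] (by simp)).cons_cons (b.headD 0))

theorem pvMax2_fold_aux (rs : List (List Int)) : ∀ a : List Int, a ≠ [] →
    (∀ r ∈ rs, r ≠ []) → (∀ r ∈ rs, a.headD 0 < r.headD 0) →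
    rs.Pairwise (fun u v => u.headD 0 < v.headD 0) →
    rs.foldl pvMax2 a =
      (rs.foldl (fun acc x => match acc with
        | none => some x
        | some m => if m.length < x.length then some x else some m) (some a)).getD [] := by
  induction rs with
  | nil => intro a _ _ _ _; rfl
  | cons r t ih =>
      intro a ha hne hlt hpw
      have hstep : pvMax2 a r = if a.length < r.length then r else a := by
        unfold pvMax2
        have h1 : a.headD 0 < r.headD 0 := hlt r List.mem_cons_self
        split_ifs <;> first | rfl | omega
      simp only [List.foldl_cons, hstep]
      by_cases hc : a.length < r.length
      · simp only [if_pos hc]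
        exact ih r (hne r List.mem_cons_self)
          (fun q hq => hne q (List.mem_cons_of_mem _ hq))
          (fun q hq => List.rel_of_pairwise_cons hpw hq) hpw.tail
      · simp only [if_neg hc]
        exact ih a ha
          (fun q hq => hne q (List.mem_cons_of_mem _ hq))
          (fun q hq => hlt q (List.mem_cons_of_mem _ hq)) hpw.tail

theorem pvMax2_fold_eq_max? (rs : List (List Int))
    (hne : ∀ r ∈ rs, r ≠ [])
    (hheads : rs.Pairwise (fun u v => u.headD 0 < v.headD 0)) :
    rs.foldl pvMax2 [] = (if rs ≠ [] then (PySem.List.max? rs (fun r => r.length)).getD [] else []) := by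
  cases rs with
  | nil => rfl
  | cons r t =>
      rw [if_pos (by simp)]
      have h0 : pvMax2 [] r = r := by
        have : r ≠ [] := hne r List.mem_cons_self
        have : 0 < r.length := List.length_pos_iff.mpr this
        unfold pvMax2
        rw [if_pos (Or.inl (by simpa using this))]
      simp only [List.foldl_cons, h0]
      rw [pvMax2_fold_aux t r (hne r List.mem_cons_self)
        (fun q hq => hne q (List.mem_cons_of_mem _ hq))
        (fun q hq => List.rel_of_pairwise_cons hheads hq) hheads.tail]
      simp only [PySem.List.max?, List.foldl_cons]
      congr 1
      show List.foldl _ _ t = List.foldl _ _ t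
      congr 1
      funext acc x
      cases acc with
      | none => rfl
      | some m => by_cases h : m.length < x.length <;> simp [h]


theorem pvBlocks_ne_nil (l : List Int) : ∀ r ∈ pvBlocks l, r ≠ [] := by
  cases l with
  | nil => intro r hr; simp [pvBlocks] at hr
  | cons s t => exact pvGlue_ne_nil t [s] (by simp)

theorem pvBlocks_heads (l : List Int) (h : l.Pairwise (· < ·)) :
    (pvBlocks l).Pairwise (fun u v => u.headD 0 < v.headD 0) := by
  cases l with
  | nil => simp [pvBlocks]
  | cons s t =>
      have hsub := pvGlue_heads_sublist t [s] (by simp)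
      have hpw := h.sublist (by simpa using hsub)
      rw [pvBlocks]
      have := List.pairwise_map (l := pvGlue [s] t) (f := fun r : List Int => r.headD 0) (R := (· < ·))
      exact this.mp (by simpa using hpw)

-- ===== VERDICT (by name: the statement is the Claim_ definition above) =====
theorem find_continuous_high_freq_sections_spec : Claim_equal_find_continuous_high_freq_sections := by
  intro sc thr _hdom
  unfold Spec_find_continuous_high_freq_sections
  rw [pvA_eq_fold, pvB_eq_fold]
  simp only []
  set items := (PySem.Dict.ofList sc).items with hitems
  set ss := PySem.List.sorted items (fun x => x.1) false with hss
  set hs : List Int := (ss.filter (fun p => thr ≤ p.2)).map (fun p => p.1) with hhs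
  set hs0 : List Int := (items.filter (fun p => thr ≤ p.2)).map (fun p => p.1) with hhs0
  -- key facts
  have hnodk : (items.map (fun p => p.1)).Nodup := by
    have := PySem.Dict.nodup_keys_ofList sc
    simpa [PySem.Dict.keys] using this
  have hperm_items : ss.Perm items := PySem.List.sorted_perm items (fun x => x.1) false
  have hss_le : ss.Pairwise (fun a b => a.1 ≤ b.1) := PySem.List.sorted_pairwise items (fun x => x.1)
  have hss_map_nodup : (ss.map (fun p => p.1)).Nodup := (hperm_items.map _).nodup_iff.mpr hnodk
  have hss_lt : ss.Pairwise (fun a b => a.1 < b.1) := by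
    have hne : ss.Pairwise (fun a b => a.1 ≠ b.1) := List.pairwise_map.mp hss_map_nodup
    exact (hss_le.and hne).imp (fun h => lt_of_le_of_ne h.1 h.2)
  have hhs_lt : hs.Pairwise (· < ·) := by
    rw [hhs]
    exact List.pairwise_map.mpr (hss_lt.filter _)
  have hhs0_nodup : hs0.Nodup := by
    rw [hhs0]
    exact hnodk.sublist (List.Sublist.map _ List.filter_sublist)
  have hperm_hs : hs.Perm hs0 := (hperm_items.filter _).map _
  have hofl : PySem.Set.ofList hs0 = hs0 := PySem.Set.ofList_eq_self_of_nodup hs0 hhs0_nodup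
  set high : PySem.Set Int := PySem.Set.ofList hs0 with hhigh
  have hmemH : ∀ x : Int, x ∈ high ↔ x ∈ hs := by
    intro x
    rw [hofl]
    exact (hperm_hs.mem_iff).symm
  have hlenH : hs.length = high.length := by
    rw [hofl]; exact hperm_hs.length_eq
  -- A side
  rw [pvAStep_fold thr ss [] [] hss_lt (fun h => absurd rfl h), if_pos rfl, List.nil_append]
  -- B side
  have hBperm : high.foldl (pvBStep high) [] = hs.foldl (pvBStep high) [] := by
    have : (high : List Int).Perm hs := by rw [hofl]; exact hperm_hs.symm
    exact @List.Perm.foldl_eq _ _ (pvBStep high) _ _ ⟨pvBStep_rcomm high⟩ this []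
  rw [hBperm, pvBStep_fold high hs []]
  rw [pvCands_eq_blocks high hs hhs_lt (fun x hx => (hmemH x).mpr hx)
    (fun y hy hny => absurd ((hmemH y).mp hy) hny) (le_of_eq hlenH)]
  -- both sides are the first longest block
  rw [pvMax2_fold_eq_max? (pvBlocks hs) (pvBlocks_ne_nil hs) (pvBlocks_heads hs hhs_lt)]
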